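-- pv_equiv track=rewrite | github.com/yenua/Coding-Test | Programmers/121683.py | solution
-- ===== SOURCE A (Python) =====
-- from collections import defaultdict
--
-- def solution(input_string):
--     alphabet = defaultdict(int)
--     for i, string in enumerate(input_string):
--         if i!= 0 and string == input_string[i-1]:
--             continue
--         if alphabet[string]:
--            alphabet[string] += 1
--         else:
--             alphabet[string] = 1
--
--     answer = []
--     for i in alphabet:
--         if alphabet[i] != 1:
--             answer.append(i)
--     answer = ''.join(sorted(answer))
--     if answer == '':
--         answer = 'N'
--     return answer
-- ===== SOURCE B (Python) =====
-- def solution(input_string):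
--     # one pass: char -> [first_index, last_index, count]; a char forms more than
--     # one consecutive group iff its occurrences are not one contiguous block,
--     # i.e. last - first + 1 != count
--     info = {}
--     for i, ch in enumerate(input_string):
--         if ch in info:
--             rec = info[ch]
--             rec[1] = i
--             rec[2] += 1
--         else:
--             info[ch] = [i, i, 1]
--     answer = ''.join(sorted(ch for ch, (f, l, c) in info.items() if l - f + 1 != c))
--     return answer if answer else 'N'
-- ===== Notes on version B (the rewrite author's own statement) =====
-- stated objective: alternative
-- what changed: A counts consecutive-run starts per character (collapsing repeats with a continue) and keeps chars whose run count is not 1; B instead records first index, last index and total count per character in one pass and keeps chars whose occurrences are not a single contiguous block (last - first + 1 != count).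
import Mathlib
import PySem

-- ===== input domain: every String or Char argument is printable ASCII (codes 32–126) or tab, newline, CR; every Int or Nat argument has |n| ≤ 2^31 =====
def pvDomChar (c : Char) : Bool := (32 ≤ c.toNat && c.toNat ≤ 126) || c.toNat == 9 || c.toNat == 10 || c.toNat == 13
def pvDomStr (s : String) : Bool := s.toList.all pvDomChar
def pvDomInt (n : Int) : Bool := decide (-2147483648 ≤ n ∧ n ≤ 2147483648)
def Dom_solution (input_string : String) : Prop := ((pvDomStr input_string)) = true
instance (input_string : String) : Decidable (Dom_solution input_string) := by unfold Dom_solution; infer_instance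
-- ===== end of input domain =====

-- B replaces A's run-start counting by first/last-index-plus-count range arithmetic (alternative one-pass decomposition, same cost).

-- ===== PORT A =====
-- the body of A's first for-loop (the defaultdict never stores 0: a first access inside 'if alphabet[string]:' nets to inserting 1)
def stepA (s : List Char) (d : PySem.Dict Char Int) (p : Int × Char) : PySem.Dict Char Int :=
  if p.1 ≠ 0 ∧ PySem.List.pyGet? s (p.1 - 1) = some p.2 then d
  else if PySem.Dict.getD d p.2 0 ≠ 0 then PySem.Dict.modify d p.2 0 (· + 1)
  else PySem.Dict.insert d p.2 1

def dictA (s : List Char) : PySem.Dict Char Int :=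
  (PySem.List.enumerate s).foldl (stepA s) PySem.Dict.empty

def solution (input_string : String) : String :=
  let alphabet := dictA input_string.toList
  let answer := alphabet.keys.foldl
    (fun acc c => if PySem.Dict.getD alphabet c 0 ≠ 1 then acc ++ [c] else acc) ([] : List Char)
  let answer := PySem.List.sorted answer (fun x => x) false
  if answer = [] then "N" else String.ofList answer

-- ===== PORT B =====
-- Source B's loop body: char -> (first_index, last_index, count)
def stepB (d : PySem.Dict Char (Int × Int × Int)) (p : Int × Char) : PySem.Dict Char (Int × Int × Int) :=
  if PySem.Dict.contains d p.2 then
    PySem.Dict.modify d p.2 (0, 0, 0) (fun r => (r.1, p.1, r.2.2 + 1))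
  else PySem.Dict.insert d p.2 (p.1, p.1, 1)

def dictB (s : List Char) : PySem.Dict Char (Int × Int × Int) :=
  (PySem.List.enumerate s).foldl stepB PySem.Dict.empty

def solution_alt (input_string : String) : String :=
  let info := dictB input_string.toList
  let picked := (info.items.filter (fun q => decide (q.2.2.1 - q.2.1 + 1 ≠ q.2.2.2))).map (·.1)
  let answer := PySem.List.sorted picked (fun x => x) false
  if answer = [] then "N" else String.ofList answer

-- ===== PRECONDITION & SPEC =====
def Spec_solution (input_string : String) (out : String) : Prop := out = solution_alt input_string
instance (input_string : String) (out : String) : Decidable (Spec_solution input_string out) := by unfold Spec_solution; infer_instance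

-- ===== CLAIM (what is proved, stated in full; the proofs are below) =====
def Claim_equal_solution : Prop := ∀ (input_string : String), Dom_solution input_string → Spec_solution input_string (solution input_string)

-- ===== LEMMAS AND PROOFS =====

theorem dictA_append (l : List Char) (x : Char) :
    dictA (l ++ [x]) = stepA (l ++ [x]) (dictA l) ((l.length : Int), x) := by
  unfold dictA
  rw [PySem.List.enumerate_append, List.foldl_append]
  simp only [PySem.List.enumerate, zero_add, List.foldl_cons, List.foldl_nil]
  congr 1
  apply PySem.List.foldl_congr_mem
  intro acc p hp
  rw [PySem.List.mem_enumerate_iff] at hp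
  obtain ⟨k, hk, rfl⟩ := hp
  unfold stepA
  rcases Nat.eq_zero_or_pos k with h0 | h0
  · subst h0; simp
  · have hcast : (0 + (k : Int)) - 1 = ((k - 1 : Nat) : Int) := by omega
    simp only [hcast, PySem.List.pyGet?_natCast]
    rw [List.getElem?_append_left (by omega)]

theorem dictA_append' (l : List Char) (x : Char) :
    dictA (l ++ [x]) =
      if l.getLast? = some x then dictA l
      else if PySem.Dict.getD (dictA l) x 0 ≠ 0 then PySem.Dict.modify (dictA l) x 0 (· + 1)
      else PySem.Dict.insert (dictA l) x 1 := by
  rw [dictA_append]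
  unfold stepA
  rcases List.eq_nil_or_concat' l with rfl | ⟨l', y, rfl⟩
  · simp
  · have hlen : 0 < (l' ++ [y]).length := by simp
    have hcast : (((l' ++ [y]).length : Int)) - 1 = (((l' ++ [y]).length - 1 : Nat) : Int) := by
      push_cast [hlen]; omega
    simp only [hcast, PySem.List.pyGet?_natCast]
    rw [List.getElem?_append_left (by omega), ← List.getLast?_eq_getElem?]
    have h2 : ¬(((l'.length : Int)) + 1 = 0) := by omega
    simp [h2]

theorem dictB_append (l : List Char) (x : Char) :
    dictB (l ++ [x]) = stepB (dictB l) ((l.length : Int), x) := by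
  unfold dictB
  rw [PySem.List.enumerate_append, List.foldl_append]
  simp [PySem.List.enumerate]

-- what holds of one entry after n characters: a = A's run count, t = B's (first, last, count),
-- lastc = the last character processed so far
def GoodEntry (a : Int) (n : Nat) (lastc : Option Char) (c : Char)
    (t : Int × Int × Int) : Prop :=
  1 ≤ a ∧ 1 ≤ t.2.2 ∧ t.2.2 ≤ t.2.1 - t.1 + 1 ∧ 0 ≤ t.1 ∧
  t.2.1 < (n : Int) ∧ (t.2.1 = (n : Int) - 1 ↔ lastc = some c) ∧
  (a = 1 ↔ t.2.1 - t.1 + 1 = t.2.2)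

theorem GoodEntry.bump {a : Int} {n : Nat} {lastc : Option Char} {c x : Char}
    {t : Int × Int × Int} (h : GoodEntry a n lastc c t) (hne : c ≠ x) :
    GoodEntry a (n + 1) (some x) c t := by
  obtain ⟨h1, h2, h3, h4, h5, h6, h7⟩ := h
  refine ⟨h1, h2, h3, h4, by push_cast; omega, ?_, h7⟩
  constructor
  · intro h; exfalso; push_cast at h; omega
  · intro h; exact absurd (Option.some_inj.1 h).symm hne

theorem GoodEntry.extend {a : Int} {n : Nat} {lastc : Option Char} {c : Char}
    {t : Int × Int × Int} (h : GoodEntry a n lastc c t) (hl : lastc = some c) :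
    GoodEntry a (n + 1) (some c) c (t.1, (n : Int), t.2.2 + 1) := by
  obtain ⟨h1, h2, h3, h4, h5, h6, h7⟩ := h
  have hla : t.2.1 = (n : Int) - 1 := h6.2 hl
  refine ⟨h1, by dsimp only; omega, by dsimp only; omega, h4, by dsimp only; push_cast; omega,
    ?_, ?_⟩
  · dsimp only; constructor <;> intro _ <;> [rfl; (push_cast; omega)]
  · dsimp only; rw [h7]; constructor <;> intro _ <;> omega

theorem GoodEntry.newRun {a : Int} {n : Nat} {lastc : Option Char} {c : Char}
    {t : Int × Int × Int} (h : GoodEntry a n lastc c t) (hl : lastc ≠ some c) :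
    GoodEntry (a + 1) (n + 1) (some c) c (t.1, (n : Int), t.2.2 + 1) := by
  obtain ⟨h1, h2, h3, h4, h5, h6, h7⟩ := h
  have hla : t.2.1 ≠ (n : Int) - 1 := fun hh => hl (h6.1 hh)
  refine ⟨by omega, by dsimp only; omega, by dsimp only; omega, h4, by dsimp only; push_cast; omega,
    ?_, ?_⟩
  · dsimp only; constructor <;> intro _ <;> [rfl; (push_cast; omega)]
  · dsimp only
    constructor
    · intro hh; exfalso; omega
    · intro hh; exfalso; omega

theorem GoodEntry.init (n : Nat) (c : Char) :
    GoodEntry 1 (n + 1) (some c) c ((n : Int), (n : Int), 1) := by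
  refine ⟨le_refl 1, le_refl 1, by dsimp only; omega, by positivity, by dsimp only; push_cast; omega,
    ?_, ?_⟩
  · dsimp only; constructor <;> intro _ <;> [rfl; (push_cast; omega)]
  · dsimp only; constructor <;> intro _ <;> [omega; rfl]

def LoopInv (l : List Char) : Prop :=
  (dictA l).keys = (dictB l).keys ∧ (dictB l).keys.Nodup ∧
  (∀ c : Char, (dictB l).contains c = true ↔ c ∈ l) ∧
  (∀ c : Char, (dictB l).contains c = true →
      GoodEntry (PySem.Dict.getD (dictA l) c 0) l.length l.getLast? c
        (PySem.Dict.getD (dictB l) c (0,0,0)))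

theorem inv_all (l : List Char) : LoopInv l := by
  induction l using List.reverseRecOn with
  | nil =>
    refine ⟨rfl, PySem.Dict.nodup_keys_empty, ?_, ?_⟩
    · intro c; simp [dictB, PySem.List.enumerate, PySem.Dict.contains_empty]
    · intro c hc; simp [dictB, PySem.List.enumerate, PySem.Dict.contains_empty] at hc
  | append_singleton l x ih =>
    obtain ⟨hkeys, hnd, hmem, hent⟩ := ih
    have hmem' : ∀ c : Char, (c == x || (dictB l).contains c) = true ↔ c ∈ l ++ [x] := by
      intro c
      constructor
      · intro h
        rcases Bool.or_eq_true_iff.1 h with h | h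
        · exact List.mem_append.2 (Or.inr (by simp [beq_iff_eq.1 h]))
        · exact List.mem_append.2 (Or.inl ((hmem c).1 h))
      · intro h
        rcases List.mem_append.1 h with h | h
        · exact Bool.or_eq_true_iff.2 (Or.inr ((hmem c).2 h))
        · simp at h; simp [h]
    have hcontains : ∀ c : Char, (c == x || (dictB l).contains c) = true → c ≠ x →
        (dictB l).contains c = true := by
      intro c h hne
      rcases Bool.or_eq_true_iff.1 h with h | h
      · exact absurd (beq_iff_eq.1 h) hne
      · exact h
    unfold LoopInv
    rw [dictA_append', dictB_append]
    unfold stepB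
    simp only [List.length_append, List.getLast?_concat, List.length_cons, List.length_nil,
      Nat.zero_add]
    by_cases hlast : l.getLast? = some x
    · -- x continues the last run: A skips, B extends (last := i, count += 1)
      have hxl : x ∈ l := List.mem_of_getLast? hlast
      have hcx : (dictB l).contains x = true := (hmem x).2 hxl
      rw [if_pos hlast, if_pos hcx]
      refine ⟨?_, ?_, ?_, ?_⟩
      · rw [PySem.Dict.keys_modify, PySem.Dict.keys_insert_of_contains _ _ hcx]; exact hkeys
      · rw [PySem.Dict.keys_modify, PySem.Dict.keys_insert_of_contains _ _ hcx]; exact hnd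
      · intro c; rw [PySem.Dict.contains_modify]; exact hmem' c
      · intro c hc
        rw [PySem.Dict.contains_modify] at hc
        by_cases hcx2 : c = x
        · subst hcx2
          rw [PySem.Dict.getD_modify_self]
          exact (hent c hcx).extend hlast
        · rw [PySem.Dict.getD_modify_of_ne _ _ _ hcx2]
          exact (hent c (hcontains c hc hcx2)).bump hcx2
    · rw [if_neg hlast]
      by_cases hxl : x ∈ l
      · -- new, non-adjacent run of a previously seen char
        have hcx : (dictB l).contains x = true := (hmem x).2 hxl
        have hcAx : (dictA l).contains x = true := by
          rw [PySem.Dict.contains_iff_mem_keys, hkeys, ← PySem.Dict.contains_iff_mem_keys]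
          exact hcx
        have hA0 : PySem.Dict.getD (dictA l) x 0 ≠ 0 := by
          have := (hent x hcx).1; omega
        rw [if_pos hA0, if_pos hcx]
        refine ⟨?_, ?_, ?_, ?_⟩
        · rw [PySem.Dict.keys_modify, PySem.Dict.keys_insert_of_contains _ _ hcAx,
              PySem.Dict.keys_modify, PySem.Dict.keys_insert_of_contains _ _ hcx]
          exact hkeys
        · rw [PySem.Dict.keys_modify, PySem.Dict.keys_insert_of_contains _ _ hcx]; exact hnd
        · intro c; rw [PySem.Dict.contains_modify]; exact hmem' c
        · intro c hc
          rw [PySem.Dict.contains_modify] at hc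
          by_cases hcx2 : c = x
          · subst hcx2
            rw [PySem.Dict.getD_modify_self, PySem.Dict.getD_modify_self]
            exact (hent c hcx).newRun hlast
          · rw [PySem.Dict.getD_modify_of_ne _ _ _ hcx2, PySem.Dict.getD_modify_of_ne _ _ _ hcx2]
            exact (hent c (hcontains c hc hcx2)).bump hcx2
      · -- first occurrence of x: both sides insert a fresh entry
        have hcx : (dictB l).contains x = false := by
          rcases h : (dictB l).contains x with _ | _
          · rfl
          · exact absurd ((hmem x).1 h) hxl
        have hcAx : (dictA l).contains x = false := by
          rcases h : (dictA l).contains x with _ | _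
          · rfl
          · refine absurd ((hmem x).1 ?_) hxl
            rw [PySem.Dict.contains_iff_mem_keys, ← hkeys, ← PySem.Dict.contains_iff_mem_keys]
            exact h
        have hA0 : PySem.Dict.getD (dictA l) x 0 = 0 :=
          PySem.Dict.getD_of_not_contains _ _ hcAx
        rw [if_neg (by rw [hA0]; simp), if_neg (by rw [hcx]; simp)]
        refine ⟨?_, ?_, ?_, ?_⟩
        · rw [PySem.Dict.keys_insert_of_not_contains _ _ hcAx,
              PySem.Dict.keys_insert_of_not_contains _ _ hcx, hkeys]
        · exact PySem.Dict.nodup_keys_insert _ _ _ hnd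
        · intro c; rw [PySem.Dict.contains_insert]; exact hmem' c
        · intro c hc
          rw [PySem.Dict.contains_insert] at hc
          by_cases hcx2 : c = x
          · subst hcx2
            rw [PySem.Dict.getD_insert_self, PySem.Dict.getD_insert_self]
            exact GoodEntry.init l.length c
          · rw [PySem.Dict.getD_insert_of_ne _ _ _ hcx2, PySem.Dict.getD_insert_of_ne _ _ _ hcx2]
            exact (hent c (hcontains c hc hcx2)).bump hcx2

theorem picked_eq (s : List Char) :
    ((dictB s).items.filter (fun q => decide (q.2.2.1 - q.2.1 + 1 ≠ q.2.2.2))).map (·.1)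
      = (dictA s).keys.foldl
          (fun acc c => if PySem.Dict.getD (dictA s) c 0 ≠ 1 then acc ++ [c] else acc) [] := by
  obtain ⟨hkeys, hnd, hmem, hent⟩ := inv_all s
  rw [PySem.List.foldl_append_ite_eq_filter, List.nil_append]
  rw [PySem.Dict.items_eq_map_keys _ hnd ((0 : Int), (0 : Int), (0 : Int)), List.filter_map,
      List.map_map, hkeys]
  have hid : (fun x : Char × (Int × Int × Int) => x.1) ∘
      (fun k : Char => (k, PySem.Dict.getD (dictB s) k (0,0,0))) = fun k => k := rfl
  rw [hid, List.map_id']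
  apply List.filter_congr
  intro c hc
  have hcont : (dictB s).contains c = true :=
    (PySem.Dict.contains_iff_mem_keys _ _).2 (hkeys ▸ hc)
  have h7 := (hent c hcont).2.2.2.2.2.2
  simp only [Function.comp_apply, decide_eq_decide]
  exact not_iff_not.2 (Iff.symm h7)

-- ===== VERDICT (by name: the statement is the Claim_ definition above) =====
theorem solution_spec : Claim_equal_solution := by
  intro s _
  show solution s = solution_alt s
  simp only [solution, solution_alt]
  rw [picked_eq]
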